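-- pv_equiv track=rewrite | github.com/RautainenLintu/StationarySourceEncoding | main.py | generate_coding_words
-- ===== SOURCE A (Python) =====
-- def generate_coding_words(q, size):
--     words = []
--     m = 1
--     while q ** m < size:
--         m += 1
--     for i in range(size):
--         word = ""
--         element = i
--         for j in range(m):
--             word += str(element % q)
--             element //= q
--         words.append(word)
--     return words
-- ===== SOURCE B (Python) =====
-- def generate_coding_words(q, size):
--     words = []
--     m = 1
--     while q ** m < size:
--         m += 1
--     d = [0] * m
--     for _ in range(size):
--         words.append(''.join(str(x) for x in d))
--         carry = 1
--         k = 0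
--         while carry != 0 and k < m:
--             t = d[k] + carry
--             d[k] = t % q
--             carry = t // q
--             k += 1
--     return words
-- ===== Notes on version B (the rewrite author's own statement) =====
-- stated objective: alternative
-- what changed: B keeps A's m-finding loop but replaces the per-number mod/div digit extraction by a running digit list incremented once per number with carry propagation (an odometer), joining the digits instead of concatenating inside the extraction loop.
import Mathlib
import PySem

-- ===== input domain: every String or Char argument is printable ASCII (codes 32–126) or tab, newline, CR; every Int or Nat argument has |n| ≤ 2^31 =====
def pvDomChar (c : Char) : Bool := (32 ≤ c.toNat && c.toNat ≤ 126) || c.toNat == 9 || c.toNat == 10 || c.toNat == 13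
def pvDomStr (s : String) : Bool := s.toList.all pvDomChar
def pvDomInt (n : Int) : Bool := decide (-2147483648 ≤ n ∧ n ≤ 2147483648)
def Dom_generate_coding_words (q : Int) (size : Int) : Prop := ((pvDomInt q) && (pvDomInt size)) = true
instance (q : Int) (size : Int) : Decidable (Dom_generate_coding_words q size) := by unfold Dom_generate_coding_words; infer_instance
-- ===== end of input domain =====

-- B keeps A's m-finding loop but replaces per-number digit extraction by an incremental
-- odometer (carry-propagating increment of a running digit list): alternative decomposition, same output.


-- ===== PORT A =====
-- the 'while q ** m < size: m += 1' loop, fuel-bounded (fuel only makes it total;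
-- 64 exceeds the loop count on every input admitted by Pre_ ∧ Dom_)
def pvFindM (q : Int) (size : Int) : Nat → Nat → Nat
  | 0, m => m
  | fuel + 1, m => if q ^ m < size then pvFindM q size fuel (m + 1) else m

-- inner loop of A: for j in range(m): word += str(element % q); element //= q
def pvWordA (q : Int) : Nat → Int → String → String
  | 0, _, word => word
  | j + 1, element, word =>
      pvWordA q j (PySem.Int.floordiv element q) (word ++ PySem.Int.toStr (PySem.Int.mod element q))

def generate_coding_words (q : Int) (size : Int) : List String :=
  let m := pvFindM q size 64 1
  (PySem.List.pyRange 0 size 1).foldl (fun words i => words ++ [pvWordA q m i ""]) []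

-- ===== PORT B =====
-- increment of the digit list d by carry c (Source B's 'while carry != 0 and k < m' loop)
def pvIncr (q : Int) (c : Int) : List Int → List Int
  | [] => []
  | dk :: rest =>
      if c = 0 then dk :: rest
      else PySem.Int.mod (dk + c) q :: pvIncr q (PySem.Int.floordiv (dk + c) q) rest

def generate_coding_words_alt (q : Int) (size : Int) : List String :=
  let m := pvFindM q size 64 1
  ((PySem.List.pyRange 0 size 1).foldl
    (fun (st : List String × List Int) _ =>
      (st.1 ++ [PySem.Str.join "" (st.2.map PySem.Int.toStr)], pvIncr q 1 st.2))
    ([], List.replicate m 0)).1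

-- ===== PRECONDITION & SPEC =====
-- Pre_ excludes exactly the inputs on which A never returns: for q ∈ {-1, 0, 1} and large
-- enough size the while loop 'q ** m < size' runs forever (and q = 0 would divide by zero).
def Pre_generate_coding_words (q : Int) (size : Int) : Prop :=
  2 ≤ q ∨ q ≤ -2 ∨ size ≤ 0 ∨ (q ≠ 0 ∧ size ≤ 1)
instance (q : Int) (size : Int) : Decidable (Pre_generate_coding_words q size) := by
  unfold Pre_generate_coding_words; infer_instance

def pvWitness_generate_coding_words : Int × Int := (3, 10)

def Spec_generate_coding_words (q : Int) (size : Int) (out : List String) : Prop := out = generate_coding_words_alt q size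
instance (q : Int) (size : Int) (out : List String) : Decidable (Spec_generate_coding_words q size out) := by unfold Spec_generate_coding_words; infer_instance

-- ===== CLAIM (what is proved, stated in full; the proofs are below) =====
def Claim_equal_generate_coding_words : Prop := ∀ (q : Int) (size : Int), Dom_generate_coding_words q size → Pre_generate_coding_words q size → Spec_generate_coding_words q size (generate_coding_words q size)

-- ===== LEMMAS AND PROOFS =====

-- canonical low-to-high digit list of e in base q, m digits (the values A extracts)
def pvDig (q : Int) : Nat → Int → List Int
  | 0, _ => []
  | m + 1, e => PySem.Int.mod e q :: pvDig q m (PySem.Int.floordiv e q)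

theorem pvDig_zero (q : Int) (m : Nat) : pvDig q m 0 = List.replicate m 0 := by
  induction m with
  | zero => rfl
  | succ m ih => simp [pvDig, PySem.Int.mod, PySem.Int.floordiv, Int.zero_fmod, Int.zero_fdiv, ih,
      List.replicate_succ]

theorem pv_fmod_add (q e c : Int) : Int.fmod (Int.fmod e q + c) q = Int.fmod (e + c) q :=
  Int.fmod_add_fmod e q c

theorem pv_fdiv_add (q e c : Int) (hq : q ≠ 0) :
    Int.fdiv e q + Int.fdiv (Int.fmod e q + c) q = Int.fdiv (e + c) q := by
  conv_rhs => rw [show e + c = (Int.fmod e q + c) + (Int.fdiv e q) * q by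
    have h := Int.mul_fdiv_add_fmod e q
    have : q * Int.fdiv e q = Int.fdiv e q * q := mul_comm _ _
    omega]
  rw [Int.add_mul_fdiv_right _ _ hq]; ring

-- the key invariant: incrementing the canonical digit list by c gives the digit list of e + c
theorem pvIncr_dig (q : Int) (hq : q ≠ 0) : ∀ (m : Nat) (c e : Int),
    pvIncr q c (pvDig q m e) = pvDig q m (e + c) := by
  intro m
  induction m with
  | zero => intro c e; rfl
  | succ m ih =>
      intro c e
      by_cases hc : c = 0
      · subst hc; simp [pvDig, pvIncr]
      · simp only [pvDig, pvIncr, if_neg hc, PySem.Int.mod, PySem.Int.floordiv]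
        rw [pv_fmod_add, ih, pv_fdiv_add q e c hq]

-- join with empty separator peels one element
theorem pv_join_nil_cons (x : List Char) (l : List (List Char)) :
    PySem.Chars.join [] (x :: l) = x ++ PySem.Chars.join [] l := by
  cases l with
  | nil => simp [PySem.Chars.join_singleton, PySem.Chars.join_nil]
  | cons y l => rw [PySem.Chars.join_cons_cons]; simp

-- A's inner word loop builds the join of the digit strings
theorem pvWordA_toList (q : Int) : ∀ (j : Nat) (e : Int) (w : String),
    (pvWordA q j e w).toList
      = w.toList ++ PySem.Chars.join [] ((pvDig q j e).map PySem.Int.toChars) := by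
  intro j
  induction j with
  | zero => intro e w; simp [pvWordA, pvDig]
  | succ j ih =>
      intro e w
      simp only [pvWordA, pvDig, List.map_cons]
      rw [ih, pv_join_nil_cons]
      simp [PySem.Int.toList_toStr, List.append_assoc]

-- B's word from the digit list equals A's word for that element
theorem pv_word_eq (q : Int) (m : Nat) (e : Int) :
    pvWordA q m e "" = PySem.Str.join "" ((pvDig q m e).map PySem.Int.toStr) := by
  apply String.toList_inj.mp
  rw [pvWordA_toList, PySem.Str.toList_join]
  simp only [List.map_map, String.toList_empty, List.nil_append]
  congr 1
  apply List.map_congr_left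
  intro x _
  simp [Function.comp, PySem.Int.toList_toStr]

-- B's main loop with the invariant d = pvDig q m i
theorem pvB_loop (q : Int) (m : Nat) (hq : q ≠ 0) : ∀ (n : Nat) (i : Int) (ws : List String),
    ((PySem.List.pyRange i (i + n) 1).foldl
      (fun (st : List String × List Int) _ =>
        (st.1 ++ [PySem.Str.join "" (st.2.map PySem.Int.toStr)], pvIncr q 1 st.2))
      (ws, pvDig q m i)).1
    = ws ++ (PySem.List.pyRange i (i + n) 1).map (fun j => pvWordA q m j "") := by
  intro n
  induction n with
  | zero =>
      intro i ws
      rw [show i + (0 : Nat) = i by simp, PySem.List.pyRange_one_eq_nil le_rfl]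
      simp
  | succ n ih =>
      intro i ws
      have hlt : i < i + ((n : Nat) + 1 : Nat) := by push_cast; omega
      rw [PySem.List.pyRange_one_cons hlt]
      simp only [List.foldl_cons, List.map_cons]
      rw [pvIncr_dig q hq m 1 i]
      have : i + ((n : Nat) + 1 : Nat) = (i + 1) + (n : Nat) := by push_cast; ring
      rw [this, ih (i + 1) (ws ++ [PySem.Str.join "" ((pvDig q m i).map PySem.Int.toStr)])]
      rw [pv_word_eq q m i]
      simp

-- ===== VERDICT (by name: the statement is the Claim_ definition above) =====
theorem generate_coding_words_spec : Claim_equal_generate_coding_words := by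
  intro q size _ hpre
  unfold Spec_generate_coding_words
  simp only [generate_coding_words, generate_coding_words_alt]
  by_cases hsz : size ≤ 0
  · simp [PySem.List.pyRange_one_eq_nil hsz]
  · have hq : q ≠ 0 := by
      rcases hpre with h | h | h | h
      · omega
      · omega
      · omega
      · exact h.1
    set M := pvFindM q size 64 1 with hM
    have hsn : size = (0 : Int) + (size.toNat : Int) := by omega
    rw [PySem.List.foldl_append_singleton_eq_map, hsn, ← pvDig_zero q M,
      pvB_loop q M hq size.toNat 0 []]
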